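-- pv_equiv track=rewrite | github.com/jmin123/coding-problem-repo | puzzle_game_challenge.py | solution
-- ===== SOURCE A (Python) =====
-- def can_solve(diffs, times, limit, level):
--     total_time = 0
--     prev_time = 0
--
--     for diff, time_cur in zip(diffs, times):
--         # 만약 지금의 레벨로도 해결 가능하면
--         if diff <= level:
--             total_time += time_cur
--         # 만약 지금의 레벨로 해결이 불가능하면
--         else:
--             # 틀린 횟수 * (이전 퍼즐 풀기 시간 + 현재 퍼즐 풀기 시간) + 현재 퍼즐 풀기 시간
--             total_time += (prev_time + time_cur) * (diff - level) + time_cur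
--         # 한도를 넘어가 버리면
--         if total_time > limit:
--             return False
--         prev_time = time_cur
--     return True
--
-- def solution(diffs, times, limit):
--     left = 1  # 최소 레벨은 1
--     right = max(diffs)
--     answer = right # 최대 레벨은 최대 난이도
--
--     while left <= right:
--         mid = (left + right) // 2
--         # 최소값을 찾아야 하니까 right를 갱신
--         if can_solve(diffs, times, limit, mid):
--             answer = mid
--             right = mid - 1
--         else:
--             left = mid + 1
--     return answer
-- ===== SOURCE B (Python) =====
-- def solution(diffs, times, limit):
--     top = max(diffs)
--     pairs = list(zip(diffs, times))
--     prevs = [0] + [t for _, t in pairs[:-1]]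
--
--     def feasible(level):
--         costs = [t + (p + t) * max(d - level, 0) for (d, t), p in zip(pairs, prevs)]
--         running = []
--         s = 0
--         for c in costs:
--             s += c
--             running.append(s)
--         return all(r <= limit for r in running)
--
--     def search(lo, hi):
--         if lo > hi:
--             return None
--         mid = (lo + hi) // 2
--         if feasible(mid):
--             found = search(lo, mid - 1)
--             return mid if found is None else found
--         return search(mid + 1, hi)
--
--     res = search(1, top)
--     return top if res is None else res
-- ===== Notes on version B (the rewrite author's own statement) =====
-- stated objective: alternative
-- what changed: can_solve's stateful branching loop with early return is replaced by a branch-free closed-form cost list t + (prev+t)*max(d-level,0) checked via a list of running prefix sums, and the answer-tracking while-loop bisection by an Option-returning recursive descent that returns the last feasible probe.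
import Mathlib
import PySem

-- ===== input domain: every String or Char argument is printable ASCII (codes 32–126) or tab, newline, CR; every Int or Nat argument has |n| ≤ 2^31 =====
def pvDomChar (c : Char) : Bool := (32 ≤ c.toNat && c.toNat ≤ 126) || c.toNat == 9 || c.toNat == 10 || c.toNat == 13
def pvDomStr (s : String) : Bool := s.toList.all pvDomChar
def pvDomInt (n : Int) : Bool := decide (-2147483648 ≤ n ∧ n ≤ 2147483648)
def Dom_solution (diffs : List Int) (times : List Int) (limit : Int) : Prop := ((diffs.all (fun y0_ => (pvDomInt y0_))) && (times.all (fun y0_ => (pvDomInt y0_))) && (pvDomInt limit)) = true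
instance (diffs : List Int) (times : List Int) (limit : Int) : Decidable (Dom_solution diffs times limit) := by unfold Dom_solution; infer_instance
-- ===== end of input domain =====

-- B replaces can_solve's stateful branching loop by a branch-free closed-form cost list with a
-- prefix-sum check, and the answer-tracking while-loop bisection by an Option-returning recursive
-- descent; equal to A wherever max(diffs) succeeds (return value only, no mutation involved).

-- ===== PORT A =====
-- can_solve's for-loop over zip(diffs, times), state (total_time, prev_time), early return False
def canSolveAux (limit level : Int) : List (Int × Int) → Int → Int → Bool
  | [], _, _ => true
  | (d, t) :: rest, total, prev =>
      let total' := if d ≤ level then total + t else total + (prev + t) * (d - level) + t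
      if limit < total' then false else canSolveAux limit level rest total' t

def canSolve (diffs times : List Int) (limit level : Int) : Bool :=
  canSolveAux limit level (diffs.zip times) 0 0

-- the while left <= right loop with the answer accumulator
def solLoop (diffs times : List Int) (limit left right answer : Int) : Int :=
  if h : left ≤ right then
    let mid := PySem.Int.floordiv (left + right) 2
    if canSolve diffs times limit mid then
      solLoop diffs times limit left (mid - 1) mid
    else
      solLoop diffs times limit (mid + 1) right answer
  else answer
termination_by (right + 1 - left).toNat
decreasing_by
  · have hb := PySem.Int.floordiv_two_mid_bounds h
    omega
  · have hb := PySem.Int.floordiv_two_mid_bounds h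
    omega

def solution (diffs : List Int) (times : List Int) (limit : Int) : Int :=
  match PySem.List.max? diffs (fun y => y) with
  | none => 0  -- unreachable under Pre_solution: max([]) raises ValueError
  | some right => solLoop diffs times limit 1 right right

-- ===== PORT B =====
-- feasible(level): branch-free costs  t + (p + t) * max(d - level, 0), running prefix sums, all <= limit
def altFeasible (pairs : List (Int × Int)) (prevs : List Int) (limit level : Int) : Bool :=
  let costs := (pairs.zip prevs).map (fun pr => pr.1.2 + (pr.2 + pr.1.2) * (max (pr.1.1 - level) 0))
  let running := (costs.foldl (fun (acc : List Int × Int) c => (acc.1 ++ [acc.2 + c], acc.2 + c)) ([], 0)).1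
  running.all (fun r => decide (r ≤ limit))

-- search(lo, hi): recursive descent returning the last feasible probe on the path, if any
def altSearch (pairs : List (Int × Int)) (prevs : List Int) (limit lo hi : Int) : Option Int :=
  if h : lo > hi then none
  else
    let mid := PySem.Int.floordiv (lo + hi) 2
    if altFeasible pairs prevs limit mid then
      match altSearch pairs prevs limit lo (mid - 1) with
      | none => some mid
      | some x => some x
    else altSearch pairs prevs limit (mid + 1) hi
termination_by (hi + 1 - lo).toNat
decreasing_by
  · have hb := PySem.Int.floordiv_two_mid_bounds (by omega : lo ≤ hi)
    omega
  · have hb := PySem.Int.floordiv_two_mid_bounds (by omega : lo ≤ hi)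
    omega

def solution_alt (diffs : List Int) (times : List Int) (limit : Int) : Int :=
  match PySem.List.max? diffs (fun y => y) with
  | none => 0  -- unreachable under Pre_solution: max([]) raises ValueError
  | some top =>
      let pairs := diffs.zip times
      let prevs := 0 :: pairs.dropLast.map Prod.snd
      match altSearch pairs prevs limit 1 top with
      | none => top
      | some res => res

-- ===== PRECONDITION & SPEC =====
-- Pre_ excludes only empty diffs, on which A's max(diffs) raises ValueError (B raises there too).
def Pre_solution (diffs : List Int) (times : List Int) (limit : Int) : Prop := diffs ≠ []
instance (diffs : List Int) (times : List Int) (limit : Int) : Decidable (Pre_solution diffs times limit) := by unfold Pre_solution; infer_instance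

def pvWitness_solution : List Int × List Int × Int := ([3, 1, 2], [10, 20, 30], 100)

def Spec_solution (diffs : List Int) (times : List Int) (limit : Int) (out : Int) : Prop := out = solution_alt diffs times limit
instance (diffs : List Int) (times : List Int) (limit : Int) (out : Int) : Decidable (Spec_solution diffs times limit out) := by unfold Spec_solution; infer_instance

-- ===== CLAIM (what is proved, stated in full; the proofs are below) =====
def Claim_equal_solution : Prop := ∀ (diffs : List Int) (times : List Int) (limit : Int), Dom_solution diffs times limit → Pre_solution diffs times limit → Spec_solution diffs times limit (solution diffs times limit)

-- ===== LEMMAS AND PROOFS =====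

-- B's cost list, recursively: cons equation for pairs.zip (prev :: pairs.dropLast.map snd) mapped
def costsOf (level : Int) (pairs : List (Int × Int)) (prev : Int) : List Int :=
  (pairs.zip (prev :: pairs.dropLast.map Prod.snd)).map
    (fun pr => pr.1.2 + (pr.2 + pr.1.2) * (max (pr.1.1 - level) 0))

theorem costsOf_cons (level d t : Int) (rest : List (Int × Int)) (prev : Int) :
    costsOf level ((d, t) :: rest) prev
      = (t + (prev + t) * (max (d - level) 0)) :: costsOf level rest t := by
  cases rest with
  | nil => rfl
  | cons r rs => simp [costsOf, List.dropLast]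

-- all prefix sums of cs, started at s, are ≤ limit
def prefAll (limit : Int) : List Int → Int → Bool
  | [], _ => true
  | c :: cs, s => (decide (s + c ≤ limit)) && prefAll limit cs (s + c)

theorem foldl_running_all (limit : Int) (cs : List Int) :
    ∀ (acc : List Int) (s : Int),
      ((cs.foldl (fun (acc : List Int × Int) c => (acc.1 ++ [acc.2 + c], acc.2 + c)) (acc, s)).1).all
          (fun r => decide (r ≤ limit))
        = (acc.all (fun r => decide (r ≤ limit)) && prefAll limit cs s) := by
  induction cs with
  | nil => intro acc s; simp [prefAll]
  | cons c cs ih =>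
      intro acc s
      rw [List.foldl_cons, ih (acc ++ [s + c]) (s + c)]
      simp [prefAll, Bool.and_assoc]

theorem altFeasible_eq_prefAll (pairs : List (Int × Int)) (prev limit level : Int) :
    altFeasible pairs (prev :: pairs.dropLast.map Prod.snd) limit level
      = prefAll limit (costsOf level pairs prev) 0 := by
  have h := foldl_running_all limit (costsOf level pairs prev) [] 0
  rw [List.all_nil, Bool.true_and] at h
  exact h

theorem canSolveAux_eq_prefAll (limit level : Int) (pairs : List (Int × Int)) :
    ∀ (total prev : Int),
      canSolveAux limit level pairs total prev = prefAll limit (costsOf level pairs prev) total := by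
  induction pairs with
  | nil => intro total prev; simp [canSolveAux, costsOf, prefAll]
  | cons hd rest ih =>
      intro total prev
      obtain ⟨d, t⟩ := hd
      rw [costsOf_cons]
      simp only [canSolveAux, prefAll, ih]
      have hc : (if d ≤ level then total + t else total + (prev + t) * (d - level) + t)
          = total + (t + (prev + t) * (max (d - level) 0)) := by
        by_cases hd : d ≤ level
        · have hmx : max (d - level) 0 = 0 := by omega
          rw [if_pos hd, hmx]; ring
        · have hmx : max (d - level) 0 = d - level := by omega
          rw [if_neg hd, hmx]; ring
      rw [hc]
      by_cases hl : limit < total + (t + (prev + t) * (max (d - level) 0))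
      · simp [hl, show ¬ (total + (t + (prev + t) * max (d - level) 0) ≤ limit) by omega]
      · simp [hl, show total + (t + (prev + t) * max (d - level) 0) ≤ limit by omega]

-- the two feasibility tests agree
theorem canSolve_eq_altFeasible (diffs times : List Int) (limit level : Int) :
    canSolve diffs times limit level
      = altFeasible (diffs.zip times) (0 :: (diffs.zip times).dropLast.map Prod.snd) limit level := by
  rw [canSolve, canSolveAux_eq_prefAll, altFeasible_eq_prefAll]

-- the answer-tracking loop equals the Option-returning descent with getD
theorem solLoop_eq_altSearch (diffs times : List Int) (limit : Int) :
    ∀ (lo hi answer : Int),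
      solLoop diffs times limit lo hi answer
        = (altSearch (diffs.zip times) (0 :: (diffs.zip times).dropLast.map Prod.snd) limit lo hi).getD answer := by
  intro lo hi answer
  induction lo, hi, answer using solLoop.induct diffs times limit with
  | case1 lo hi answer h mid hc ih =>
      have hm : ¬ lo > hi := by omega
      have hc' : canSolve diffs times limit (PySem.Int.floordiv (lo + hi) 2) = true := hc
      have ih' : solLoop diffs times limit lo (PySem.Int.floordiv (lo + hi) 2 - 1)
            (PySem.Int.floordiv (lo + hi) 2)
          = (altSearch (diffs.zip times) (0 :: (diffs.zip times).dropLast.map Prod.snd) limit lo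
              (PySem.Int.floordiv (lo + hi) 2 - 1)).getD (PySem.Int.floordiv (lo + hi) 2) := ih
      rw [solLoop, altSearch, dif_pos h, dif_neg hm]
      show (if canSolve diffs times limit (PySem.Int.floordiv (lo + hi) 2) = true then
              solLoop diffs times limit lo (PySem.Int.floordiv (lo + hi) 2 - 1)
                (PySem.Int.floordiv (lo + hi) 2)
            else solLoop diffs times limit (PySem.Int.floordiv (lo + hi) 2 + 1) hi answer)
          = (if altFeasible (diffs.zip times) (0 :: (diffs.zip times).dropLast.map Prod.snd) limit
                  (PySem.Int.floordiv (lo + hi) 2) = true then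
              match altSearch (diffs.zip times) (0 :: (diffs.zip times).dropLast.map Prod.snd) limit
                  lo (PySem.Int.floordiv (lo + hi) 2 - 1) with
              | none => some (PySem.Int.floordiv (lo + hi) 2)
              | some x => some x
            else altSearch (diffs.zip times) (0 :: (diffs.zip times).dropLast.map Prod.snd) limit
                (PySem.Int.floordiv (lo + hi) 2 + 1) hi).getD answer
      rw [← canSolve_eq_altFeasible, if_pos hc', if_pos hc', ih']
      cases altSearch (diffs.zip times) (0 :: (diffs.zip times).dropLast.map Prod.snd) limit lo
          (PySem.Int.floordiv (lo + hi) 2 - 1) <;> rfl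
  | case2 lo hi answer h mid hc ih =>
      have hm : ¬ lo > hi := by omega
      have hc' : ¬ canSolve diffs times limit (PySem.Int.floordiv (lo + hi) 2) = true := hc
      have ih' : solLoop diffs times limit (PySem.Int.floordiv (lo + hi) 2 + 1) hi answer
          = (altSearch (diffs.zip times) (0 :: (diffs.zip times).dropLast.map Prod.snd) limit
              (PySem.Int.floordiv (lo + hi) 2 + 1) hi).getD answer := ih
      rw [solLoop, altSearch, dif_pos h, dif_neg hm]
      show (if canSolve diffs times limit (PySem.Int.floordiv (lo + hi) 2) = true then
              solLoop diffs times limit lo (PySem.Int.floordiv (lo + hi) 2 - 1)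
                (PySem.Int.floordiv (lo + hi) 2)
            else solLoop diffs times limit (PySem.Int.floordiv (lo + hi) 2 + 1) hi answer)
          = (if altFeasible (diffs.zip times) (0 :: (diffs.zip times).dropLast.map Prod.snd) limit
                  (PySem.Int.floordiv (lo + hi) 2) = true then
              match altSearch (diffs.zip times) (0 :: (diffs.zip times).dropLast.map Prod.snd) limit
                  lo (PySem.Int.floordiv (lo + hi) 2 - 1) with
              | none => some (PySem.Int.floordiv (lo + hi) 2)
              | some x => some x
            else altSearch (diffs.zip times) (0 :: (diffs.zip times).dropLast.map Prod.snd) limit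
                (PySem.Int.floordiv (lo + hi) 2 + 1) hi).getD answer
      rw [← canSolve_eq_altFeasible, if_neg hc', if_neg hc', ih']
  | case3 lo hi answer h =>
      have hm : lo > hi := by omega
      rw [solLoop, altSearch, dif_neg h, dif_pos hm]
      rfl

-- ===== VERDICT (by name: the statement is the Claim_ definition above) =====
theorem solution_spec : Claim_equal_solution := by
  intro diffs times limit _ hpre
  unfold Spec_solution solution solution_alt
  cases hm : PySem.List.max? diffs (fun y => y) with
  | none => exact absurd ((PySem.List.max?_eq_none_iff diffs (fun y => y)).mp hm) hpre
  | some top =>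
      simp only []
      rw [solLoop_eq_altSearch]
      cases altSearch (diffs.zip times) (0 :: (diffs.zip times).dropLast.map Prod.snd) limit 1 top <;> rfl
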